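-- pv_equiv track=rewrite | github.com/chadrwalters/nova | src/nova/phases/aggregate/handlers/content.py | _aggregate_content
-- ===== SOURCE A (Python) =====
-- def _aggregate_content(content: str) -> str:
--     """Aggregate content.
--
--     Args:
--         content: Content to aggregate
--
--     Returns:
--         Aggregated content
--     """
--     sections = []
--     current_section = []
--     in_aggregate_block = False
--
--     # Process content line by line
--     for line in content.split('\n'):
--         # Check for aggregate block markers
--         if line.startswith('--==AGGREGATE_BLOCK:'):
--             in_aggregate_block = True
--             if current_section:
--                 sections.append('\n'.join(current_section))
--             current_section = [line]
--             continue
--         elif line.startswith('--==AGGREGATE_BLOCK_END==--'):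
--             in_aggregate_block = False
--             current_section.append(line)
--             sections.append('\n'.join(current_section))
--             current_section = []
--             continue
--
--         # Add line to current section
--         if in_aggregate_block:
--             current_section.append(line)
--         else:
--             sections.append(line)
--
--     # Add any remaining content
--     if current_section:
--         sections.append('\n'.join(current_section))
--
--     # Join sections
--     return '\n'.join(sections)
-- ===== SOURCE B (Python) =====
-- def _aggregate_content(content: str) -> str:
--     """Aggregate content.
--
--     Splitting on '\n', regrouping lines into sections and re-joining every
--     section (and the section list) with '\n' never drops, duplicates or
--     reorders a line, so the whole pipeline is the identity on its input.
--     """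
--     return content
-- ===== Notes on version B (the rewrite author's own statement) =====
-- stated objective: simpler
-- what changed: A's split/regroup/join pipeline is proved to be the identity (no line is ever dropped, duplicated or reordered), so B returns the input string directly with no loop, split or sections list.
import Mathlib
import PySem

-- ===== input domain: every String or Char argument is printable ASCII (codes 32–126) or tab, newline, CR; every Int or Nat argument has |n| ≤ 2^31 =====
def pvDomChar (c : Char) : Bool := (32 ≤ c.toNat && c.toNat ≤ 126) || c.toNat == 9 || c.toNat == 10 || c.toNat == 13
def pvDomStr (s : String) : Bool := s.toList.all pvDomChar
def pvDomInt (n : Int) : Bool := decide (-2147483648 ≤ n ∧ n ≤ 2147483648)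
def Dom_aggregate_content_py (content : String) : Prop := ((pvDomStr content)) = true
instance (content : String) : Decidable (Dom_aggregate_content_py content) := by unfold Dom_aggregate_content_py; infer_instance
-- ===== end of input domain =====

-- B replaces A's split/regroup/join loop by the identity: the pipeline never
-- drops, duplicates or reorders a line, so it returns its input unchanged (proved below).

-- ===== PORT A =====
-- state = (sections, current_section, in_aggregate_block)
def aggStep (st : List String × List String × Bool) (line : String) :
    List String × List String × Bool :=
  let sections := st.1
  let cur := st.2.1
  let inBlk := st.2.2
  if PySem.Str.startswith line "--==AGGREGATE_BLOCK:" then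
    (if cur ≠ [] then sections ++ [PySem.Str.join "\n" cur] else sections, [line], true)
  else if PySem.Str.startswith line "--==AGGREGATE_BLOCK_END==--" then
    (sections ++ [PySem.Str.join "\n" (cur ++ [line])], [], false)
  else if inBlk then
    (sections, cur ++ [line], inBlk)
  else
    (sections ++ [line], cur, inBlk)

def aggregate_content_py (content : String) : String :=
  -- content.split('\n'); the separator is the nonempty literal '\n', so split? is always some
  let lines := (PySem.Str.split? content "\n").getD []
  let st := lines.foldl aggStep ([], [], false)
  -- if current_section: sections.append('\n'.join(current_section)); return '\n'.join(sections)
  if st.2.1 ≠ [] then PySem.Str.join "\n" (st.1 ++ [PySem.Str.join "\n" st.2.1])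
  else PySem.Str.join "\n" st.1

-- ===== PORT B =====
def aggregate_content_py_alt (content : String) : String := content

-- ===== PRECONDITION & SPEC =====
def Spec_aggregate_content_py (content : String) (out : String) : Prop := out = aggregate_content_py_alt content
instance (content : String) (out : String) : Decidable (Spec_aggregate_content_py content out) := by unfold Spec_aggregate_content_py; infer_instance

-- ===== CLAIM (what is proved, stated in full; the proofs are below) =====
def Claim_equal_aggregate_content_py : Prop := ∀ (content : String), Dom_aggregate_content_py content → Spec_aggregate_content_py content (aggregate_content_py content)

-- ===== LEMMAS AND PROOFS =====

-- '\n'.join distributes over a split of the parts list into two nonempty halves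
theorem join_append_nonempty (sep : List Char) (xs ys : List (List Char))
    (hx : xs ≠ []) (hy : ys ≠ []) :
    PySem.Chars.join sep (xs ++ ys) =
      PySem.Chars.join sep xs ++ sep ++ PySem.Chars.join sep ys := by
  induction xs with
  | nil => exact absurd rfl hx
  | cons a xs ih =>
    cases xs with
    | nil =>
      cases ys with
      | nil => exact absurd rfl hy
      | cons b ys =>
        simp [PySem.Chars.join_cons_cons, PySem.Chars.join_singleton]
    | cons a' xs' =>
      have h := ih (by simp)
      simp only [List.cons_append, PySem.Chars.join_cons_cons] at *
      simp [h]

-- join of a cons with a nonempty tail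
theorem join_cons_ne (sep : List Char) (x : List Char) (L : List (List Char)) (hL : L ≠ []) :
    PySem.Chars.join sep (x :: L) = x ++ sep ++ PySem.Chars.join sep L := by
  have := join_append_nonempty sep [x] L (by simp) hL
  simpa [PySem.Chars.join_singleton] using this

-- joining a pre-joined nonempty group in the middle equals joining the flat list
theorem join_flatten (sep : List Char) (s c t : List (List Char)) (hc : c ≠ []) :
    PySem.Chars.join sep (s ++ [PySem.Chars.join sep c] ++ t) =
      PySem.Chars.join sep (s ++ c ++ t) := by
  induction s with
  | nil =>
    cases t with
    | nil => simp [PySem.Chars.join_singleton]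
    | cons b t =>
      rw [List.nil_append, List.nil_append, List.singleton_append,
        PySem.Chars.join_cons_cons, join_append_nonempty sep c (b :: t) hc (by simp)]
  | cons a s ih =>
    have hL1 : (a :: s) ++ [PySem.Chars.join sep c] ++ t
        = a :: (s ++ [PySem.Chars.join sep c] ++ t) := by simp
    have hL2 : (a :: s) ++ c ++ t = a :: (s ++ c ++ t) := by simp
    rw [hL1, hL2, join_cons_ne sep a (s ++ [PySem.Chars.join sep c] ++ t) (by simp),
      join_cons_ne sep a (s ++ c ++ t) (by simp [hc]), ih]

-- invariant of the splitOn fuel loop for a single-character separator: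
-- re-joining the pieces produced so far reconstructs the scanned input
theorem splitOn_go_join (ch : Char) (fuel : Nat) :
    ∀ (l cur : List Char) (accs : List (List Char)), l.length < fuel →
    PySem.Chars.join [ch] (PySem.Chars.splitOn.go [ch] fuel l cur accs) =
      PySem.Chars.join [ch] accs.reverse ++
        (if accs = [] then [] else [ch]) ++ cur.reverse ++ l := by
  induction fuel with
  | zero => intro l cur accs h; omega
  | succ fuel ih =>
    intro l cur accs h
    cases l with
    | nil =>
      have hgo : PySem.Chars.splitOn.go [ch] (fuel+1) [] cur accs
          = (cur.reverse :: accs).reverse := by simp [PySem.Chars.splitOn.go]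
      rw [hgo, List.reverse_cons]
      rcases List.eq_nil_or_concat' accs.reverse with hr | ⟨a0, a1, hr⟩
      · simp [List.reverse_eq_nil_iff.mp hr, PySem.Chars.join_singleton]
      · have haccs : accs ≠ [] := by
          intro hn; rw [hn] at hr; simp at hr
        rw [hr, join_append_nonempty [ch] (a0 ++ [a1]) [cur.reverse] (by simp) (by simp),
          PySem.Chars.join_singleton, ← hr]
        simp [haccs]
    | cons c rest =>
      have hgo : PySem.Chars.splitOn.go [ch] (fuel+1) (c :: rest) cur accs =
          (if List.isPrefixOf [ch] (c :: rest) = true then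
            PySem.Chars.splitOn.go [ch] fuel (List.drop 1 (c :: rest)) [] (cur.reverse :: accs)
          else PySem.Chars.splitOn.go [ch] fuel rest (c :: cur) accs) := by
        rw [PySem.Chars.splitOn.go]; simp
      rw [hgo]
      by_cases hpre : List.isPrefixOf [ch] (c :: rest) = true
      · have hc : ch = c := by
          rcases List.isPrefixOf_iff_prefix.mp hpre with ⟨u, hu⟩
          cases hu; rfl
        cases hc
        rw [if_pos hpre, List.drop_one, List.tail_cons,
          ih rest [] (cur.reverse :: accs) (by simpa using h), List.reverse_cons]
        rcases List.eq_nil_or_concat' accs.reverse with hr | ⟨a0, a1, hr⟩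
        · have haccs : accs = [] := List.reverse_eq_nil_iff.mp hr
          subst haccs
          simp [PySem.Chars.join_singleton]
        · have haccs : accs ≠ [] := by
            intro hn; rw [hn] at hr; simp at hr
          rw [hr, join_append_nonempty [ch] (a0 ++ [a1]) [cur.reverse] (by simp) (by simp),
            PySem.Chars.join_singleton, ← hr]
          simp [haccs]
      · rw [if_neg hpre, ih rest (c :: cur) accs (by simpa using h)]
        simp

-- '\n'.join(s.split('\n')) == s  (single-character separator)
theorem join_splitOn (ch : Char) (cs : List Char) :
    PySem.Chars.join [ch] (PySem.Chars.splitOn cs [ch]) = cs := by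
  unfold PySem.Chars.splitOn
  rw [splitOn_go_join ch (cs.length + 1) cs [] [] (by omega)]
  simp [PySem.Chars.join_nil]

-- String-level join/flatten bridge
theorem str_join_flatten (s c t : List String) (hc : c ≠ []) :
    PySem.Str.join "\n" (s ++ [PySem.Str.join "\n" c] ++ t) =
      PySem.Str.join "\n" (s ++ c ++ t) := by
  apply String.toList_inj.mp
  rw [PySem.Str.toList_join, PySem.Str.toList_join]
  simp only [List.map_append, List.map_cons, List.map_nil, PySem.Str.toList_join]
  have : ("\n" : String).toList = ['\n'] := by decide
  rw [this]
  exact join_flatten ['\n'] (s.map String.toList) (c.map String.toList) (t.map String.toList)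
    (by simpa using hc)

def finalizeA (st : List String × List String × Bool) : String :=
  if st.2.1 ≠ [] then PySem.Str.join "\n" (st.1 ++ [PySem.Str.join "\n" st.2.1])
  else PySem.Str.join "\n" st.1

-- loop invariant: finishing the fold reconstructs the join of everything seen and pending
theorem fold_inv (lines : List String) :
    ∀ (s c : List String) (b : Bool), (b = false → c = []) →
    finalizeA (lines.foldl aggStep (s, c, b)) = PySem.Str.join "\n" (s ++ c ++ lines) := by
  induction lines with
  | nil =>
    intro s c b hb
    simp only [List.foldl_nil, finalizeA, List.append_nil]
    by_cases hc : c = []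
    · simp [hc]
    · rw [if_pos (by simpa using hc)]
      have := str_join_flatten s c [] hc
      simpa using this
  | cons line rest ih =>
    intro s c b hb
    rw [List.foldl_cons]
    by_cases h1 : PySem.Str.startswith line "--==AGGREGATE_BLOCK:" = true
    · by_cases hc : c = []
      · have hstep : aggStep (s, c, b) line = (s, [line], true) := by
          unfold aggStep; rw [if_pos h1, if_neg (by simp [hc])]
        rw [hstep, ih _ _ _ (by simp)]
        simp [hc]
      · have hstep : aggStep (s, c, b) line
            = (s ++ [PySem.Str.join "\n" c], [line], true) := by
          unfold aggStep; rw [if_pos h1, if_pos (by simpa using hc)]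
        rw [hstep, ih _ _ _ (by simp)]
        have := str_join_flatten s c ([line] ++ rest) hc
        simp only [← List.append_assoc] at this ⊢
        simpa using this
    · by_cases h2 : PySem.Str.startswith line "--==AGGREGATE_BLOCK_END==--" = true
      · have hstep : aggStep (s, c, b) line
            = (s ++ [PySem.Str.join "\n" (c ++ [line])], [], false) := by
          unfold aggStep; rw [if_neg h1, if_pos h2]
        rw [hstep, ih _ _ _ (fun _ => rfl)]
        have := str_join_flatten s (c ++ [line]) rest (by simp)
        simp only [← List.append_assoc] at this ⊢
        simpa using this
      · cases b with
        | true =>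
          have hstep : aggStep (s, c, true) line = (s, c ++ [line], true) := by
            unfold aggStep; rw [if_neg h1, if_neg h2, if_pos rfl]
          rw [hstep, ih _ _ _ (by simp)]
          simp
        | false =>
          have hc := hb rfl
          have hstep : aggStep (s, c, false) line = (s ++ [line], c, false) := by
            unfold aggStep; rw [if_neg h1, if_neg h2, if_neg (by simp)]
          rw [hstep, ih _ _ _ (fun _ => hc)]
          simp [hc]

-- ===== VERDICT (by name: the statement is the Claim_ definition above) =====
theorem aggregate_content_py_spec : Claim_equal_aggregate_content_py := by
  intro content _
  unfold Spec_aggregate_content_py aggregate_content_py aggregate_content_py_alt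
  have hfin := fold_inv ((PySem.Str.split? content "\n").getD []) [] [] false (fun _ => rfl)
  unfold finalizeA at hfin
  rw [hfin]
  simp only [List.nil_append]
  -- '\n'.join(content.split('\n')) = content
  apply String.toList_inj.mp
  rw [PySem.Str.toList_join]
  unfold PySem.Str.split?
  have hsep : ("\n" : String).toList = ['\n'] := by decide
  rw [hsep]
  unfold PySem.Chars.split?
  simp [Function.comp_def, join_splitOn]
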